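-- pv_equiv track=rewrite | github.com/dZev1/IntroProgGuias | ParcialesViejos/SegundosParciales/SegundoParcial2C2023_1.py | acomodar
-- ===== SOURCE A (Python) =====
-- def acomodar(s:list[str]) -> list[str]:
--     lista_up: list[str] = []
--     lista_lla: list[str] = []
--     for boleta in s:
--         if boleta == "LLA":
--             lista_lla.append(boleta)
--         if boleta == "UP":
--             lista_up.append(boleta)
--     return lista_up + lista_lla
-- ===== SOURCE B (Python) =====
-- def acomodar(s: list[str]) -> list[str]:
--     return ["UP"] * s.count("UP") + ["LLA"] * s.count("LLA")
-- ===== Notes on version B (the rewrite author's own statement) =====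
-- stated objective: simpler
-- what changed: Replaces the two accumulator lists built element-by-element with counting the two literals (list.count) and rebuilding the result by list repetition.
import Mathlib
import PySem

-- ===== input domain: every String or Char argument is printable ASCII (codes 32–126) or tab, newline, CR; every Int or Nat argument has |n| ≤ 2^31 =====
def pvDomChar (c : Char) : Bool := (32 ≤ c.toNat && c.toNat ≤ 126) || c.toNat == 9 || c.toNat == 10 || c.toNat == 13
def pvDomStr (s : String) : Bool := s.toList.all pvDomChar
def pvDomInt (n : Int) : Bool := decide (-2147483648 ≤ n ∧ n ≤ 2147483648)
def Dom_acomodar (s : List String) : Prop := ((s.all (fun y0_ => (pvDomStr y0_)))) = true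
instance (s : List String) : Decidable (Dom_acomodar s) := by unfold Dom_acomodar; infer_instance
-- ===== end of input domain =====

-- B counts the two literal strings and rebuilds by repetition instead of growing two lists element-by-element (simpler).
-- ===== PORT A =====
-- step of A's loop: 'if boleta == "LLA": append; if boleta == "UP": append' (two independent ifs, same order)
def acomodarStep (st : List String × List String) (boleta : String) : List String × List String :=
  let st := if boleta == "LLA" then (st.1, st.2 ++ [boleta]) else st
  if boleta == "UP" then (st.1 ++ [boleta], st.2) else st

def acomodar (s : List String) : List String :=
  let p := s.foldl acomodarStep ([], [])
  p.1 ++ p.2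

-- ===== PORT B =====
def acomodar_alt (s : List String) : List String :=
  List.replicate (PySem.List.count s "UP") "UP" ++ List.replicate (PySem.List.count s "LLA") "LLA"

-- ===== PRECONDITION & SPEC =====
def Spec_acomodar (s : List String) (out : List String) : Prop := out = acomodar_alt s
instance (s : List String) (out : List String) : Decidable (Spec_acomodar s out) := by unfold Spec_acomodar; infer_instance

-- ===== CLAIM (what is proved, stated in full; the proofs are below) =====
def Claim_equal_acomodar : Prop := ∀ (s : List String), Dom_acomodar s → Spec_acomodar s (acomodar s)

-- ===== LEMMAS AND PROOFS =====

-- ===== VERDICT (by name: the statement is the Claim_ definition above) =====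
lemma rep_cons_comm (n : Nat) (x : String) :
    x :: List.replicate n x = List.replicate n x ++ [x] := by
  rw [← List.replicate_succ, List.replicate_succ']

lemma acomodar_fold_inv (s : List String) (a b : List String) :
    s.foldl acomodarStep (a, b)
    = (a ++ List.replicate (s.count "UP") "UP", b ++ List.replicate (s.count "LLA") "LLA") := by
  induction s generalizing a b with
  | nil => simp
  | cons x xs ih =>
    simp only [List.foldl_cons, acomodarStep]
    by_cases hu : x = "UP"
    · subst hu
      simp [ih, rep_cons_comm, List.append_assoc]
      rw [List.replicate_succ']
    · by_cases hl : x = "LLA"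
      · subst hl
        simp [ih, rep_cons_comm, List.append_assoc]
        rw [List.replicate_succ']
      · have h1 : (x == "LLA") = false := by simp [hl]
        have h2 : (x == "UP") = false := by simp [hu]
        simp [h1, h2, ih, hl, hu]

theorem acomodar_spec : Claim_equal_acomodar := by
  intro s _
  unfold Spec_acomodar acomodar acomodar_alt
  simp [acomodar_fold_inv, PySem.List.count_eq]
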